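-- pv_equiv track=rewrite | github.com/pumperknickle/IoTTrafficModels | utilities.py | extractSignatures
-- ===== SOURCE A (Python) =====
-- def extractSignatures(clusters, n):
--     signatures = []
--     for cluster in clusters:
--         signature = []
--         for i in range(n):
--             column = []
--             for seq in cluster:
--                 column.append(seq[i])
--             signature.append((min(column), max(column)))
--         signatures.append(signature)
--     return signatures
-- ===== SOURCE B (Python) =====
-- def extractSignatures(clusters, n):
--     result = []
--     for cluster in clusters:
--         if not cluster:
--             result.append([])
--             continue
--         mins = [cluster[0][i] for i in range(n)]
--         maxs = mins[:]
--         for seq in cluster[1:]: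
--             mins = [min(m, v) for m, v in zip(mins, seq)]
--             maxs = [max(m, v) for m, v in zip(maxs, seq)]
--         result.append(list(zip(mins, maxs)))
--     return result
-- ===== Notes on version B (the rewrite author's own statement) =====
-- stated objective: alternative
-- what changed: Row-major streaming pass per cluster maintaining running per-column min/max accumulators (updated by zipping each row), instead of materialising each column list and calling min/max on it.
import Mathlib
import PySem

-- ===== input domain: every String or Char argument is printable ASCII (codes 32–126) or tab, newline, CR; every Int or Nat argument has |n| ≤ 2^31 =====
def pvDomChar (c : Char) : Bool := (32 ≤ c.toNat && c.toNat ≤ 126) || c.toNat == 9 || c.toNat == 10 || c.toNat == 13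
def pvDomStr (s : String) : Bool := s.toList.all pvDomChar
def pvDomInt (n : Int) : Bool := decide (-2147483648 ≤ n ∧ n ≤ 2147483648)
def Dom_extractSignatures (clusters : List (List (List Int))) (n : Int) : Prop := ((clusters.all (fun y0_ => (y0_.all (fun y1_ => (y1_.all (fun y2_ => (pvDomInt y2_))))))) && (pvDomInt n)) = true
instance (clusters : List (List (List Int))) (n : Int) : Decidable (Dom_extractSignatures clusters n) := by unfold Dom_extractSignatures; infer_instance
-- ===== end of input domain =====

-- B replaces A's column-building (build each column list, then min/max of it) by a
-- row-major streaming pass keeping running per-column min/max accumulators.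

-- ===== PORT A =====
def extractSignatures (clusters : List (List (List Int))) (n : Int) : List (List (Int × Int)) :=
  clusters.foldl (fun signatures cluster =>
    signatures ++ [(PySem.List.pyRange 0 n 1).foldl (fun signature i =>
      let column := cluster.foldl (fun col seq => col ++ [(PySem.List.pyGet? seq i).getD 0]) []
      signature ++ [((PySem.List.min? column (fun y => y)).getD 0,
                     (PySem.List.max? column (fun y => y)).getD 0)]) []]) []

-- ===== PORT B =====
def extractSignatures_alt (clusters : List (List (List Int))) (n : Int) : List (List (Int × Int)) :=
  clusters.map (fun cluster =>
    match cluster with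
    | [] => []
    | first :: rest =>
      let mins0 := (PySem.List.pyRange 0 n 1).map (fun i => (PySem.List.pyGet? first i).getD 0)
      let p := rest.foldl (fun (p : List Int × List Int) seq =>
        ((p.1.zip seq).map (fun q => min q.1 q.2),
         (p.2.zip seq).map (fun q => max q.1 q.2))) (mins0, mins0)
      p.1.zip p.2)

-- ===== PRECONDITION & SPEC =====
-- Pre_ excludes exactly the inputs on which A raises: a cluster that is empty while n > 0
-- (min([]) is a ValueError) and a sequence shorter than n (seq[i] is an IndexError).
def Pre_extractSignatures (clusters : List (List (List Int))) (n : Int) : Prop :=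
  ∀ cluster ∈ clusters, 0 < n → cluster ≠ [] ∧ ∀ seq ∈ cluster, n ≤ (seq.length : Int)
instance (clusters : List (List (List Int))) (n : Int) : Decidable (Pre_extractSignatures clusters n) := by unfold Pre_extractSignatures; infer_instance
def pvWitness_extractSignatures : List (List (List Int)) × Int := ([[[1, 2], [3, 0]], [[5, -1]]], 2)
def Spec_extractSignatures (clusters : List (List (List Int))) (n : Int) (out : List (List (Int × Int))) : Prop := out = extractSignatures_alt clusters n
instance (clusters : List (List (List Int))) (n : Int) (out : List (List (Int × Int))) : Decidable (Spec_extractSignatures clusters n out) := by unfold Spec_extractSignatures; infer_instance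

-- ===== CLAIM (what is proved, stated in full; the proofs are below) =====
def Claim_equal_extractSignatures : Prop := ∀ (clusters : List (List (List Int))) (n : Int), Dom_extractSignatures clusters n → Pre_extractSignatures clusters n → Spec_extractSignatures clusters n (extractSignatures clusters n)

-- ===== LEMMAS AND PROOFS =====

-- the value both programs read at column i of row seq
def pvG (seq : List Int) (i : Int) : Int := (PySem.List.pyGet? seq i).getD 0

-- zipping a row against a map over the column range, when the row is long enough
theorem pv_zip_step (op : Int → Int → Int) (f : Int → Int) (n : Int) (seq : List Int)
    (h : n ≤ (seq.length : Int)) :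
    ((((PySem.List.pyRange 0 n 1).map f).zip seq).map (fun q => op q.1 q.2))
      = (PySem.List.pyRange 0 n 1).map (fun i => op (f i) (pvG seq i)) := by
  apply List.ext_getElem
  · simp [PySem.List.length_pyRange_one]; omega
  · intro k h1 h2
    have hk : k < n.toNat := by
      simpa [PySem.List.length_pyRange_one] using h2
    have hks : k < seq.length := by omega
    simp [List.getElem_zip, PySem.List.getElem_pyRange_one, pvG,
      PySem.List.pyGet?_natCast, List.getElem?_eq_getElem hks]

-- the streaming fold keeps both components as maps over the column range
theorem pv_fold_inv (n : Int) (rest : List (List Int)) (f h : Int → Int)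
    (hlen : ∀ seq ∈ rest, n ≤ (seq.length : Int)) :
    rest.foldl (fun (p : List Int × List Int) seq =>
        ((p.1.zip seq).map (fun q => min q.1 q.2),
         (p.2.zip seq).map (fun q => max q.1 q.2)))
      ((PySem.List.pyRange 0 n 1).map f, (PySem.List.pyRange 0 n 1).map h)
      = ((PySem.List.pyRange 0 n 1).map (fun i => rest.foldl (fun a s => min a (pvG s i)) (f i)),
         (PySem.List.pyRange 0 n 1).map (fun i => rest.foldl (fun a s => max a (pvG s i)) (h i))) := by
  induction rest generalizing f h with
  | nil => simp
  | cons seq rest ih =>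
    have hs : n ≤ (seq.length : Int) := hlen seq (by simp)
    simp only [List.foldl_cons]
    rw [pv_zip_step min f n seq hs, pv_zip_step max h n seq hs,
        ih _ _ (fun s hsm => hlen s (by simp [hsm]))]

theorem pv_empty_fold (rest : List (List Int)) :
    rest.foldl (fun (p : List Int × List Int) seq =>
        ((p.1.zip seq).map (fun q => min q.1 q.2),
         (p.2.zip seq).map (fun q => max q.1 q.2))) (([] : List Int), ([] : List Int))
      = ([], []) := by
  induction rest with
  | nil => rfl
  | cons s t ih => simpa using ih

-- per nonempty cluster: A's column-wise min/max map equals B's streaming result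
theorem pv_cluster_cons (n : Int) (first : List Int) (rest : List (List Int))
    (hlen : 0 < n → ∀ seq ∈ first :: rest, n ≤ (seq.length : Int)) :
    (PySem.List.pyRange 0 n 1).map (fun i =>
        ((PySem.List.min? ((first :: rest).map (fun seq => pvG seq i)) (fun y => y)).getD 0,
         (PySem.List.max? ((first :: rest).map (fun seq => pvG seq i)) (fun y => y)).getD 0))
      = (let mins0 := (PySem.List.pyRange 0 n 1).map (fun i => (PySem.List.pyGet? first i).getD 0)
         let p := rest.foldl (fun (p : List Int × List Int) seq =>
            ((p.1.zip seq).map (fun q => min q.1 q.2),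
             (p.2.zip seq).map (fun q => max q.1 q.2))) (mins0, mins0)
         p.1.zip p.2) := by
  by_cases hn : 0 < n
  · have hmins0 : (PySem.List.pyRange 0 n 1).map (fun i => (PySem.List.pyGet? first i).getD 0)
        = (PySem.List.pyRange 0 n 1).map (pvG first) := rfl
    simp only [hmins0]
    rw [pv_fold_inv n rest (pvG first) (pvG first) (fun s hs => hlen hn s (by simp [hs]))]
    simp only [List.zip_map']
    apply List.map_congr_left
    intro i _
    simp [PySem.List.min?_id_cons, PySem.List.max?_id_cons, List.foldl_map]
  · rw [PySem.List.pyRange_one_eq_nil (by omega)]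
    simp only [List.map_nil, pv_empty_fold]
    rfl

-- ===== VERDICT (by name: the statement is the Claim_ definition above) =====
theorem extractSignatures_spec : Claim_equal_extractSignatures := by
  intro clusters n _ hpre
  unfold Spec_extractSignatures extractSignatures extractSignatures_alt
  simp only [PySem.List.foldl_append_singleton_eq_map]
  simp only [List.nil_append]
  apply List.map_congr_left
  intro cluster hc
  cases cluster with
  | nil =>
    have hn : ¬ 0 < n := fun h => ((hpre [] hc h).1) rfl
    rw [PySem.List.pyRange_one_eq_nil (by omega)]
    rfl
  | cons first rest =>
    exact pv_cluster_cons n first rest (fun h => (hpre _ hc h).2)
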